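-- pv_equiv track=rewrite | github.com/ohzeno/Algo | Programmers/NonCompany/Lv.3/N으로 표현.py | solution
-- ===== SOURCE A (Python) =====
-- def solution(N, number):
--     dp = [set() for _ in range(9)]
--     for cnt in range(1, 9):
--         cur_cases = dp[cnt]
--         cur_cases.add(int(str(N) * cnt))
--         for j in range(1, cnt // 2 + 1):
--             for a in dp[j]:
--                 for b in dp[cnt - j]:
--                     cur_cases.update({
--                         a + b, a - b, b - a, a * b,
--                         *([] if b == 0 else [a // b]),
--                         *([] if a == 0 else [b // a])
--                     })
--         if number in cur_cases:
--             return cnt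
--     return -1
-- ===== SOURCE B (Python) =====
-- def solution(N, number):
--     cache = {}
--
--     def reachable(k):
--         if k not in cache:
--             vals = {int(str(N) * k)}
--             for j in range(1, k):
--                 for a in reachable(j):
--                     for b in reachable(k - j):
--                         vals.add(a + b)
--                         vals.add(a - b)
--                         vals.add(a * b)
--                         if b != 0:
--                             vals.add(a // b)
--             cache[k] = vals
--         return cache[k]
--
--     for cnt in range(1, 9):
--         if number in reachable(cnt):
--             return cnt
--     return -1
-- ===== Notes on version B (the rewrite author's own statement) =====
-- stated objective: alternative
-- what changed: A's bottom-up DP over a mutable 9-slot array of sets, scanning splits j only up to cnt//2 and adding both orders of the non-commutative ops (a-b, b-a, a//b, b//a), is replaced by a top-down memoized recursion reachable(k) that scans the full split range 1..k-1 with single-order ops (a+b, a-b, a*b, a//b); equivalence rests on the symmetry of the split range.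
import Mathlib
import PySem

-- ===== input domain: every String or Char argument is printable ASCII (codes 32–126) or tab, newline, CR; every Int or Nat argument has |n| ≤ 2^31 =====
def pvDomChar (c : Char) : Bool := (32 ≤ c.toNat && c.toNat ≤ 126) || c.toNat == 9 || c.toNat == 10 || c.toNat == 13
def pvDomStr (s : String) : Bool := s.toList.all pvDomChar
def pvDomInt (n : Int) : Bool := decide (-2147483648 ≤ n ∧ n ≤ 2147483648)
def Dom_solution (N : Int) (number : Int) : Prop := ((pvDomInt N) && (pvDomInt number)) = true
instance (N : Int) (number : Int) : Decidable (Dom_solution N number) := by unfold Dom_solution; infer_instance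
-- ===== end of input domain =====

-- B replaces A's bottom-up 9-slot DP (half-range splits, both-order ops) by a top-down memoized
-- recursion over the full split range with single-order ops; objective: alternative decomposition.
-- Python sets are modelled by Std.HashSet (they are consumed only through membership and through
-- building further sets, so Python's hash iteration order never influences the returned Int).

-- ===== PORT A =====
-- int(str(N) * k)  (both Pythons contain this very expression; none = ValueError, outside Pre_)
def pvRep (N : Int) (k : Nat) : Int :=
  (PySem.Int.ofChars? (List.replicate k (PySem.Int.toChars N)).flatten).getD 0

-- cur_cases.update({a+b, a-b, b-a, a*b, [a//b], [b//a]})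
def pvOpsA (a b : Int) (s : Std.HashSet Int) : Std.HashSet Int :=
  let s := (((s.insert (a + b)).insert (a - b)).insert (b - a)).insert (a * b)
  let s := if b = 0 then s else s.insert (PySem.Int.floordiv a b)
  if a = 0 then s else s.insert (PySem.Int.floordiv b a)

def pvGetSet (dp : List (Std.HashSet Int)) (i : Nat) : Std.HashSet Int := dp.getD i ∅

-- one iteration of A's outer loop body (building cur_cases for this cnt)
def pvLevelA (N : Int) (dp : List (Std.HashSet Int)) (cnt : Nat) : Std.HashSet Int :=
  let cur := (pvGetSet dp cnt).insert (pvRep N cnt)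
  (List.range' 1 (cnt / 2)).foldl (fun cur j =>
    (pvGetSet dp j).toList.foldl (fun cur a =>
      (pvGetSet dp (cnt - j)).toList.foldl (fun cur b => pvOpsA a b cur) cur) cur) cur

-- for cnt in range(1, 9): … if number in cur_cases: return cnt / return -1
def pvLoopA (N number : Int) (dp : List (Std.HashSet Int)) : List Nat → Int
  | [] => -1
  | cnt :: rest =>
    let cur := pvLevelA N dp cnt
    if cur.contains number then (cnt : Int) else pvLoopA N number (dp.set cnt cur) rest

def solution (N : Int) (number : Int) : Int :=
  pvLoopA N number (List.replicate 9 ∅) (List.range' 1 8)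

-- ===== PORT B =====
-- vals.add(a+b); vals.add(a-b); vals.add(a*b); if b != 0: vals.add(a//b)
def pvOpsB (a b : Int) (s : Std.HashSet Int) : Std.HashSet Int :=
  let s := ((s.insert (a + b)).insert (a - b)).insert (a * b)
  if b = 0 then s else s.insert (PySem.Int.floordiv a b)

-- reachable(k) with its cache threaded through: on a miss the fold runs
-- j = i+1 for i in range(k-1) (Python's range(1, k)) and the result is stored
def pvReachGo (N : Int) (k : Nat) (cache : PySem.Dict Nat (Std.HashSet Int)) :
    Std.HashSet Int × PySem.Dict Nat (Std.HashSet Int) :=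
  match cache.get? k with
  | some v => (v, cache)
  | none =>
    let p := (List.range (k - 1)).attach.foldl
      (fun (p : Std.HashSet Int × PySem.Dict Nat (Std.HashSet Int)) i =>
        let r1 := pvReachGo N (i.1 + 1) p.2
        let r2 := pvReachGo N (k - 1 - i.1) r1.2
        (r1.1.toList.foldl (fun vals a =>
          r2.1.toList.foldl (fun vals b => pvOpsB a b vals) vals) p.1, r2.2))
      ((∅ : Std.HashSet Int).insert (pvRep N k), cache)
    (p.1, p.2.insert k p.1)
  termination_by k
  decreasing_by
  · have := i.2; simp [List.mem_range] at this; omega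
  · have := i.2; simp [List.mem_range] at this; omega

-- for cnt in range(1, 9): if number in reachable(cnt): return cnt / return -1
def pvLoopB (N number : Int) (cache : PySem.Dict Nat (Std.HashSet Int)) : List Nat → Int
  | [] => -1
  | cnt :: rest =>
    let r := pvReachGo N cnt cache
    if r.1.contains number then (cnt : Int) else pvLoopB N number r.2 rest

def solution_alt (N : Int) (number : Int) : Int :=
  pvLoopB N number PySem.Dict.empty (List.range' 1 8)

-- ===== PRECONDITION & SPEC =====
-- Pre_ excludes exactly the inputs on which A raises: for N < 0, unless number = N stops the loop
-- at cnt = 1, int(str(N)*2) = int("-d-d") raises ValueError at cnt = 2 (B raises there too).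
def Pre_solution (N : Int) (number : Int) : Prop := 0 ≤ N ∨ number = N
instance (N : Int) (number : Int) : Decidable (Pre_solution N number) := by
  unfold Pre_solution; infer_instance

def pvWitness_solution : Int × Int := (5, 12)

def Spec_solution (N : Int) (number : Int) (out : Int) : Prop := out = solution_alt N number
instance (N : Int) (number : Int) (out : Int) : Decidable (Spec_solution N number out) := by
  unfold Spec_solution; infer_instance

-- ===== CLAIM (what is proved, stated in full; the proofs are below) =====
def Claim_equal_solution : Prop := ∀ (N : Int) (number : Int), Dom_solution N number → Pre_solution N number → Spec_solution N number (solution N number)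

-- ===== LEMMAS AND PROOFS =====

-- the six values A's update can contribute for a pair (a, b)
def pvSymP (a b x : Int) : Prop :=
  x = a + b ∨ x = a - b ∨ x = b - a ∨ x = a * b ∨
  (b ≠ 0 ∧ x = PySem.Int.floordiv a b) ∨ (a ≠ 0 ∧ x = PySem.Int.floordiv b a)

-- the four values B's adds can contribute for a pair (a, b)
def pvSgP (a b x : Int) : Prop :=
  x = a + b ∨ x = a - b ∨ x = a * b ∨ (b ≠ 0 ∧ x = PySem.Int.floordiv a b)

-- proof-side pure form of B's recurrence (never evaluated; the ports are above)
def pvReach (N : Int) : Nat → PySem.Set Int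
  | 0 => PySem.Set.empty
  | (k + 1) =>
    (List.range k).attach.foldl (fun vals i =>
      (pvReach N (i.1 + 1)).foldl (fun vals a =>
        (pvReach N (k - i.1)).foldl (fun vals b =>
          let vals := ((vals.add (a + b)).add (a - b)).add (a * b)
          if b = 0 then vals else vals.add (PySem.Int.floordiv a b)) vals) vals)
      (PySem.Set.add PySem.Set.empty (pvRep N (k + 1)))
  decreasing_by
  · have := i.2; simp [List.mem_range] at this; omega
  · have := i.2; simp [List.mem_range] at this; omega

theorem hs_mem_insert (s : Std.HashSet Int) (a x : Int) :
    x ∈ s.insert a ↔ x = a ∨ x ∈ s := by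
  rw [Std.HashSet.mem_insert, beq_iff_eq]
  exact or_congr eq_comm Iff.rfl

theorem mem_pvOpsA (a b x : Int) (s : Std.HashSet Int) :
    x ∈ pvOpsA a b s ↔ x ∈ s ∨ pvSymP a b x := by
  unfold pvOpsA pvSymP
  split_ifs with hb ha ha <;>
    simp [hb, ha] <;> tauto

theorem mem_pvOpsB (a b x : Int) (s : Std.HashSet Int) :
    x ∈ pvOpsB a b s ↔ x ∈ s ∨ pvSgP a b x := by
  unfold pvOpsB pvSgP
  split_ifs with hb <;>
    simp [hb] <;> tauto

theorem mem_pvOpsP (a b x : Int) (s : PySem.Set Int) :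
    x ∈ (let s := ((s.add (a + b)).add (a - b)).add (a * b)
         if b = 0 then s else s.add (PySem.Int.floordiv a b)) ↔ x ∈ s ∨ pvSgP a b x := by
  unfold pvSgP
  split_ifs with hb <;> simp [PySem.Set.mem_add, hb] <;> tauto

-- generic: membership through a fold whose step only adds elements described by P
theorem mem_foldl_step {α β : Type} [Membership Int β] (f : β → α → β) (P : α → Int → Prop)
    (hf : ∀ s a x, x ∈ f s a ↔ x ∈ s ∨ P a x) :
    ∀ (l : List α) (s : β) (x : Int),
      x ∈ l.foldl f s ↔ x ∈ s ∨ ∃ a ∈ l, P a x := by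
  intro l
  induction l with
  | nil => simp
  | cons a l ih =>
    intro s x
    simp only [List.foldl_cons, ih, hf, List.mem_cons]
    constructor
    · rintro ((h | h) | ⟨a', ha', h⟩)
      · exact Or.inl h
      · exact Or.inr ⟨a, Or.inl rfl, h⟩
      · exact Or.inr ⟨a', Or.inr ha', h⟩
    · rintro (h | ⟨a', (rfl | ha'), h⟩)
      · exact Or.inl (Or.inl h)
      · exact Or.inl (Or.inr h)
      · exact Or.inr ⟨a', ha', h⟩

theorem mem_pairFoldA (S T : List Int) (s : Std.HashSet Int) (x : Int) :
    x ∈ S.foldl (fun cur a => T.foldl (fun cur b => pvOpsA a b cur) cur) s ↔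
      x ∈ s ∨ ∃ a ∈ S, ∃ b ∈ T, pvSymP a b x := by
  exact mem_foldl_step _ (fun a x => ∃ b ∈ T, pvSymP a b x)
    (fun s a x => mem_foldl_step _ (pvSymP a) (fun s b x => mem_pvOpsA a b x s) T s x)
    S s x

theorem mem_pairFoldB (S T : List Int) (s : Std.HashSet Int) (x : Int) :
    x ∈ S.foldl (fun cur a => T.foldl (fun cur b => pvOpsB a b cur) cur) s ↔
      x ∈ s ∨ ∃ a ∈ S, ∃ b ∈ T, pvSgP a b x := by
  exact mem_foldl_step _ (fun a x => ∃ b ∈ T, pvSgP a b x)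
    (fun s a x => mem_foldl_step _ (pvSgP a) (fun s b x => mem_pvOpsB a b x s) T s x)
    S s x

theorem mem_pairFoldP (S T s : PySem.Set Int) (x : Int) :
    x ∈ S.foldl (fun vals a => T.foldl (fun vals b =>
        let vals := ((vals.add (a + b)).add (a - b)).add (a * b)
        if b = 0 then vals else vals.add (PySem.Int.floordiv a b)) vals) s ↔
      x ∈ s ∨ ∃ a ∈ S, ∃ b ∈ T, pvSgP a b x := by
  exact mem_foldl_step _ (fun a x => ∃ b ∈ T, pvSgP a b x)
    (fun s a x => mem_foldl_step _ (pvSgP a) (fun s b x => mem_pvOpsP a b x s) T s x)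
    S s x

theorem mem_pvLevelA (N : Int) (dp : List (Std.HashSet Int)) (cnt : Nat) (x : Int) :
    x ∈ pvLevelA N dp cnt ↔
      (x = pvRep N cnt ∨ x ∈ pvGetSet dp cnt) ∨
      ∃ j ∈ List.range' 1 (cnt / 2), ∃ a ∈ pvGetSet dp j, ∃ b ∈ pvGetSet dp (cnt - j), pvSymP a b x := by
  unfold pvLevelA
  rw [mem_foldl_step _
    (fun j x => ∃ a ∈ (pvGetSet dp j).toList, ∃ b ∈ (pvGetSet dp (cnt - j)).toList, pvSymP a b x)
    (fun s j x => mem_pairFoldA _ _ s x)]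
  simp [Std.HashSet.mem_toList]
  exact or_congr (or_congr eq_comm Iff.rfl) Iff.rfl

theorem mem_pvReach (N : Int) (k : Nat) (x : Int) :
    x ∈ pvReach N (k + 1) ↔
      x = pvRep N (k + 1) ∨
      ∃ j, 1 ≤ j ∧ j ≤ k ∧ ∃ a ∈ pvReach N j, ∃ b ∈ pvReach N (k + 1 - j), pvSgP a b x := by
  rw [pvReach]
  rw [mem_foldl_step _
    (fun (i : {i // i ∈ List.range k}) x =>
      ∃ a ∈ pvReach N (i.1 + 1), ∃ b ∈ pvReach N (k - i.1), pvSgP a b x)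
    (fun s i x => mem_pairFoldP _ _ s x)]
  simp only [PySem.Set.mem_add, PySem.Set.empty, List.not_mem_nil, false_or, List.mem_attach,
    true_and]
  constructor
  · rintro (rfl | ⟨⟨i, hi⟩, h⟩)
    · exact Or.inl rfl
    · simp only [List.mem_range] at hi
      exact Or.inr ⟨i + 1, by omega, by omega, by
        have : k + 1 - (i + 1) = k - i := by omega
        rw [this]; exact h⟩
  · rintro (rfl | ⟨j, hj1, hjk, h⟩)
    · exact Or.inl rfl
    · refine Or.inr ⟨⟨j - 1, by simp [List.mem_range]; omega⟩, ?_⟩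
      have h1 : j - 1 + 1 = j := by omega
      have h2 : k - (j - 1) = k + 1 - j := by omega
      rw [h1, h2]; exact h

-- the combinatorial core: half range with both-order ops = full range with single-order ops
theorem range_sym_iff (R : Nat → PySem.Set Int) (k : Nat) (x : Int) :
    (∃ j ∈ List.range' 1 ((k + 1) / 2), ∃ a ∈ R j, ∃ b ∈ R (k + 1 - j), pvSymP a b x) ↔
    (∃ j, 1 ≤ j ∧ j ≤ k ∧ ∃ a ∈ R j, ∃ b ∈ R (k + 1 - j), pvSgP a b x) := by
  set cnt := k + 1 with hcntdef
  have hk : cnt - 1 = k := by omega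
  constructor
  · rintro ⟨j, hj, a, ha, b, hb, hop⟩
    rw [List.mem_range'] at hj
    obtain ⟨i, hi, rfl⟩ := hj
    simp only [one_mul] at *
    have hj1 : 1 ≤ 1 + i := by omega
    have hj2 : 1 + i ≤ cnt / 2 := by omega
    rw [← hk]
    rcases hop with rfl | rfl | rfl | rfl | ⟨hb0, rfl⟩ | ⟨ha0, rfl⟩
    · exact ⟨1 + i, hj1, by omega, a, ha, b, hb, Or.inl rfl⟩
    · exact ⟨1 + i, hj1, by omega, a, ha, b, hb, Or.inr (Or.inl rfl)⟩
    · refine ⟨cnt - (1 + i), by omega, by omega, b, ?_, a, ?_, Or.inr (Or.inl rfl)⟩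
      · exact hb
      · have : cnt - (cnt - (1 + i)) = 1 + i := by omega
        rw [this]; exact ha
    · exact ⟨1 + i, hj1, by omega, a, ha, b, hb, Or.inr (Or.inr (Or.inl rfl))⟩
    · exact ⟨1 + i, hj1, by omega, a, ha, b, hb, Or.inr (Or.inr (Or.inr ⟨hb0, rfl⟩))⟩
    · refine ⟨cnt - (1 + i), by omega, by omega, b, ?_, a, ?_,
        Or.inr (Or.inr (Or.inr ⟨ha0, rfl⟩))⟩
      · exact hb
      · have : cnt - (cnt - (1 + i)) = 1 + i := by omega
        rw [this]; exact ha
  · rintro ⟨j, hj1, hjc, a, ha, b, hb, hop⟩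
    rw [← hk] at hjc
    have hcnt2 : 2 ≤ cnt := by omega
    by_cases hhalf : j ≤ cnt / 2
    · refine ⟨j, by rw [List.mem_range']; exact ⟨j - 1, by omega, by omega⟩, a, ha, b, hb, ?_⟩
      rcases hop with rfl | rfl | rfl | ⟨hb0, rfl⟩
      · exact Or.inl rfl
      · exact Or.inr (Or.inl rfl)
      · exact Or.inr (Or.inr (Or.inr (Or.inl rfl)))
      · exact Or.inr (Or.inr (Or.inr (Or.inr (Or.inl ⟨hb0, rfl⟩))))
    · -- use j' = cnt - j ≤ cnt / 2, swap the pair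
      refine ⟨cnt - j, by rw [List.mem_range']; exact ⟨cnt - j - 1, by omega, by omega⟩,
        b, hb, a, ?_, ?_⟩
      · have : cnt - (cnt - j) = j := by omega
        rw [this]; exact ha
      · rcases hop with rfl | rfl | rfl | ⟨hb0, rfl⟩
        · exact Or.inl (by ring)
        · exact Or.inr (Or.inr (Or.inl rfl))
        · exact Or.inr (Or.inr (Or.inr (Or.inl (by ring))))
        · exact Or.inr (Or.inr (Or.inr (Or.inr (Or.inr ⟨hb0, rfl⟩))))

-- per level: if dp agrees with pvReach below cnt and dp[cnt] is still empty,
-- A's cur_cases for cnt has the same members as reachable(cnt)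
theorem level_eq (N : Int) (dp : List (Std.HashSet Int)) (cnt : Nat) (hcnt : 1 ≤ cnt)
    (hlow : ∀ j, 1 ≤ j → j < cnt → ∀ x, x ∈ pvGetSet dp j ↔ x ∈ pvReach N j)
    (hempty : ∀ x : Int, x ∉ pvGetSet dp cnt) (x : Int) :
    x ∈ pvLevelA N dp cnt ↔ x ∈ pvReach N cnt := by
  obtain ⟨k, rfl⟩ : ∃ k, cnt = k + 1 := ⟨cnt - 1, by omega⟩
  rw [mem_pvLevelA, mem_pvReach]
  simp only [hempty, or_false]
  have hconv : (∃ j ∈ List.range' 1 ((k + 1) / 2), ∃ a ∈ pvGetSet dp j,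
        ∃ b ∈ pvGetSet dp (k + 1 - j), pvSymP a b x) ↔
      (∃ j ∈ List.range' 1 ((k + 1) / 2), ∃ a ∈ pvReach N j,
        ∃ b ∈ pvReach N (k + 1 - j), pvSymP a b x) := by
    constructor
    · rintro ⟨j, hj, a, ha, b, hb, hop⟩
      rw [List.mem_range'] at hj
      obtain ⟨i, hi, rfl⟩ := hj
      simp only [one_mul] at *
      exact ⟨1 + i, by rw [List.mem_range']; exact ⟨i, hi, by omega⟩,
        a, (hlow _ (by omega) (by omega) a).mp ha,
        b, (hlow _ (by omega) (by omega) b).mp hb, hop⟩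
    · rintro ⟨j, hj, a, ha, b, hb, hop⟩
      rw [List.mem_range'] at hj
      obtain ⟨i, hi, rfl⟩ := hj
      simp only [one_mul] at *
      exact ⟨1 + i, by rw [List.mem_range']; exact ⟨i, hi, by omega⟩,
        a, (hlow _ (by omega) (by omega) a).mpr ha,
        b, (hlow _ (by omega) (by omega) b).mpr hb, hop⟩
  rw [hconv, range_sym_iff]

theorem pvGetSet_set (dp : List (Std.HashSet Int)) (i j : Nat) (s : Std.HashSet Int)
    (hi : i < dp.length) :
    pvGetSet (dp.set i s) j = if j = i then s else pvGetSet dp j := by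
  unfold pvGetSet
  by_cases h : j = i
  · subst h; simp [List.getD, List.getElem?_set_self hi]
  · simp [List.getD, List.getElem?_set_ne (by omega : i ≠ j), h]

-- B's cache stores, for each key k ≥ 1, exactly the members of reachable(k)
def pvCacheOK (N : Int) (c : PySem.Dict Nat (Std.HashSet Int)) : Prop :=
  ∀ k v, c.get? k = some v → 1 ≤ k ∧ ∀ x, x ∈ v ↔ x ∈ pvReach N k

theorem go_spec (N : Int) : ∀ (k : Nat), 1 ≤ k → ∀ (c : PySem.Dict Nat (Std.HashSet Int)),
    pvCacheOK N c →
    pvCacheOK N (pvReachGo N k c).2 ∧ ∀ x, x ∈ (pvReachGo N k c).1 ↔ x ∈ pvReach N k := by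
  intro k
  induction k using Nat.strong_induction_on with
  | _ k IH =>
    intro hk c hc
    rw [pvReachGo.eq_def]
    cases hg : c.get? k with
    | some v => exact ⟨hc, (hc k v hg).2⟩
    | none =>
      obtain ⟨m, rfl⟩ : ∃ m, k = m + 1 := ⟨k - 1, by omega⟩
      simp only [Nat.add_sub_cancel]
      have hfold : ∀ (l : List {i // i ∈ List.range (m + 1 - 1)})
          (p : Std.HashSet Int × PySem.Dict Nat (Std.HashSet Int)), pvCacheOK N p.2 →
          pvCacheOK N (l.foldl
            (fun p i =>
              ((pvReachGo N (i.1 + 1) p.2).1.toList.foldl (fun vals a =>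
                (pvReachGo N (m - i.1) (pvReachGo N (i.1 + 1) p.2).2).1.toList.foldl
                  (fun vals b => pvOpsB a b vals) vals) p.1,
               (pvReachGo N (m - i.1) (pvReachGo N (i.1 + 1) p.2).2).2)) p).2 ∧
          ∀ x, x ∈ (l.foldl
            (fun p i =>
              ((pvReachGo N (i.1 + 1) p.2).1.toList.foldl (fun vals a =>
                (pvReachGo N (m - i.1) (pvReachGo N (i.1 + 1) p.2).2).1.toList.foldl
                  (fun vals b => pvOpsB a b vals) vals) p.1,
               (pvReachGo N (m - i.1) (pvReachGo N (i.1 + 1) p.2).2).2)) p).1 ↔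
            x ∈ p.1 ∨ ∃ i ∈ l, ∃ a ∈ pvReach N (i.1 + 1), ∃ b ∈ pvReach N (m - i.1), pvSgP a b x := by
        intro l
        induction l with
        | nil =>
          intro p hp
          refine ⟨hp, fun x => ?_⟩
          simp only [List.foldl_nil]
          constructor
          · exact Or.inl
          · rintro (h | ⟨i, hmem, _⟩)
            · exact h
            · exact absurd hmem (List.not_mem_nil)
        | cons i l ihl =>
          intro p hp
          have hi : i.1 < m := by
            have := i.2; simp only [List.mem_range] at this; omega
          have h1 := IH (i.1 + 1) (by omega) (by omega) p.2 hp
          have h2 := IH (m - i.1) (by omega) (by omega) (pvReachGo N (i.1 + 1) p.2).2 h1.1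
          simp only [List.foldl_cons]
          obtain ⟨hrec1, hrec2⟩ := ihl
            ((pvReachGo N (i.1 + 1) p.2).1.toList.foldl (fun vals a =>
                (pvReachGo N (m - i.1) (pvReachGo N (i.1 + 1) p.2).2).1.toList.foldl
                  (fun vals b => pvOpsB a b vals) vals) p.1,
             (pvReachGo N (m - i.1) (pvReachGo N (i.1 + 1) p.2).2).2) h2.1
          refine ⟨hrec1, fun x => (hrec2 x).trans ?_⟩
          have hpair : x ∈ ((pvReachGo N (i.1 + 1) p.2).1.toList.foldl (fun vals a =>
                (pvReachGo N (m - i.1) (pvReachGo N (i.1 + 1) p.2).2).1.toList.foldl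
                  (fun vals b => pvOpsB a b vals) vals) p.1,
             (pvReachGo N (m - i.1) (pvReachGo N (i.1 + 1) p.2).2).2).1 ↔
              x ∈ p.1 ∨ ∃ a ∈ pvReach N (i.1 + 1), ∃ b ∈ pvReach N (m - i.1), pvSgP a b x := by
            rw [mem_pairFoldB]
            simp only [Std.HashSet.mem_toList, h1.2, h2.2]
          rw [hpair]
          simp only [List.mem_cons]
          constructor
          · rintro ((h | h) | ⟨i', hi', h⟩)
            · exact Or.inl h
            · exact Or.inr ⟨i, Or.inl rfl, h⟩
            · exact Or.inr ⟨i', Or.inr hi', h⟩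
          · rintro (h | ⟨i', (rfl | hi'), h⟩)
            · exact Or.inl (Or.inl h)
            · exact Or.inl (Or.inr h)
            · exact Or.inr ⟨i', hi', h⟩
      obtain ⟨hcok, hmem⟩ := hfold (List.range (m + 1 - 1)).attach
        ((∅ : Std.HashSet Int).insert (pvRep N (m + 1)), c) hc
      have hcore : ∀ x : Int, (x ∈ (∅ : Std.HashSet Int).insert (pvRep N (m + 1)) ∨
          ∃ i ∈ (List.range (m + 1 - 1)).attach,
            ∃ a ∈ pvReach N (i.1 + 1), ∃ b ∈ pvReach N (m - i.1), pvSgP a b x) ↔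
          x ∈ pvReach N (m + 1) := by
        intro x
        rw [mem_pvReach]
        simp only [hs_mem_insert, Std.HashSet.not_mem_empty, or_false,
          List.mem_attach, true_and]
        constructor
        · rintro (h | ⟨⟨i, hi⟩, h⟩)
          · exact Or.inl h
          · simp only [List.mem_range] at hi
            refine Or.inr ⟨i + 1, by omega, by omega, ?_⟩
            have : m + 1 - (i + 1) = m - i := by omega
            rw [this]; exact h
        · rintro (h | ⟨j, hj1, hjm, h⟩)
          · exact Or.inl h
          · refine Or.inr ⟨⟨j - 1, by simp only [List.mem_range]; omega⟩, ?_⟩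
            have e1 : j - 1 + 1 = j := by omega
            have e2 : m - (j - 1) = m + 1 - j := by omega
            rw [e1, e2]; exact h
      constructor
      · intro k' v' hget
        by_cases hkk : k' = m + 1
        · subst hkk
          rw [PySem.Dict.get?_insert_self] at hget
          cases hget
          exact ⟨by omega, fun x => (hmem x).trans (hcore x)⟩
        · rw [PySem.Dict.get?_insert_of_ne _ _ (fun h => hkk (by simpa using h))] at hget
          exact hcok k' v' hget
      · exact fun x => (hmem x).trans (hcore x)

-- the two main loops agree from any pair of states satisfying the invariants
theorem loop_eq (N number : Int) : ∀ (fuel cnt : Nat) (dp : List (Std.HashSet Int))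
    (cache : PySem.Dict Nat (Std.HashSet Int)),
    1 ≤ cnt → cnt + fuel = 9 → dp.length = 9 →
    (∀ j, 1 ≤ j → j < cnt → ∀ x, x ∈ pvGetSet dp j ↔ x ∈ pvReach N j) →
    (∀ j, cnt ≤ j → ∀ x : Int, x ∉ pvGetSet dp j) →
    pvCacheOK N cache →
    pvLoopA N number dp (List.range' cnt fuel) = pvLoopB N number cache (List.range' cnt fuel) := by
  intro fuel
  induction fuel with
  | zero => intro cnt dp cache _ _ _ _ _ _; simp [pvLoopA, pvLoopB]
  | succ f ih =>
    intro cnt dp cache h1 hcf hlen hlow hemp hcache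
    rw [List.range'_succ]
    have hlev : ∀ x, x ∈ pvLevelA N dp cnt ↔ x ∈ pvReach N cnt :=
      level_eq N dp cnt h1 hlow (hemp cnt le_rfl)
    have hgo := go_spec N cnt h1 cache hcache
    rw [pvLoopA, pvLoopB]
    have hcont : (pvLevelA N dp cnt).contains number = (pvReachGo N cnt cache).1.contains number := by
      cases hm : (pvReachGo N cnt cache).1.contains number with
      | false =>
        simp only [Std.HashSet.contains_eq_false_iff_not_mem] at hm ⊢
        intro hmemb
        exact hm ((hgo.2 number).mpr ((hlev number).mp hmemb))
      | true =>
        simp only [Std.HashSet.contains_iff_mem] at hm ⊢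
        exact (hlev number).mpr ((hgo.2 number).mp hm)
    rw [hcont]
    by_cases hmem : (pvReachGo N cnt cache).1.contains number = true
    · rw [if_pos hmem, if_pos hmem]
    · rw [if_neg hmem, if_neg hmem]
      apply ih (cnt + 1) _ _ (by omega) (by omega) (by simpa using hlen)
      · intro j hj1 hjlt x
        rw [pvGetSet_set _ _ _ _ (by omega)]
        by_cases h : j = cnt
        · subst h; rw [if_pos rfl]; exact hlev x
        · rw [if_neg h]; exact hlow j hj1 (by omega) x
      · intro j hj x
        rw [pvGetSet_set _ _ _ _ (by omega), if_neg (by omega)]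
        exact hemp j (by omega) x
      · exact hgo.1

-- ===== VERDICT (by name: the statement is the Claim_ definition above) =====
theorem solution_spec : Claim_equal_solution := by
  intro N number _ _
  unfold Spec_solution solution solution_alt
  apply loop_eq N number 8 1 _ _ (by norm_num) (by norm_num) (by simp)
  · intro j hj1 hjlt; omega
  · intro j hj x
    unfold pvGetSet
    rw [List.getD]
    rcases Nat.lt_or_ge j 9 with h | h
    · rw [List.getElem?_replicate]
      simp [h]
    · rw [List.getElem?_eq_none (by simp; omega)]
      simp
  · intro k v hget
    simp [PySem.Dict.empty, PySem.Dict.get?] at hget
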